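-- pv_equiv track=rewrite | github.com/ni-da/iap_1819 | Assignments/modivi.py | brac_uitwerken
-- ===== SOURCE A (Python) =====
-- def is_alpha(a):
--     if 'a' <= a <= 'z' or 'A' <= a <= 'Z':
--         return True
--     return False
--
-- def brac_uitwerken(a):
--     new_word, word_part = "", ""
--     first_closeing_brac_index = a.find(")")
--     most_inner_open_brac_index = 0
--     counter = first_closeing_brac_index
--
--     while counter >= 0:
--         if a[counter] == "(":
--             most_inner_open_brac_index = counter
--             break
--         counter -= 1
--     binnenste_brac_part = a[most_inner_open_brac_index + 1:first_closeing_brac_index]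
--
--     brac_str = (a[a.rfind("(", 0, most_inner_open_brac_index) + 1:most_inner_open_brac_index])
--     counter_1 = 0
--     ls = ""
--     for counter_1 in range(len(binnenste_brac_part)):
--         if is_alpha(binnenste_brac_part[counter_1]):
--             try:
--                 if binnenste_brac_part[counter_1 + 1] == "#" and binnenste_brac_part[counter_1 + 2] != "+":
--                     word_part += binnenste_brac_part[counter_1]
--             except IndexError:
--                 pass
--             new_word += binnenste_brac_part[counter_1]
--         elif binnenste_brac_part[counter_1] == "#":
--             if word_part == new_word:
--                 if counter_1 == len(binnenste_brac_part) - 1: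
--                     ls += (brac_str + new_word + "#")
--                 else:
--                     ls += (brac_str + new_word + "#+")
--             else:
--                 if counter_1 == len(binnenste_brac_part) - 1:
--                     ls += (brac_str + word_part + new_word + "#")
--                 else:
--                     ls += (brac_str + word_part + new_word + "#+")
--             new_word = ""
--             try:
--                 if binnenste_brac_part[counter_1 + 1] == "+":
--                     word_part = ""
--             except IndexError:
--                 pass
--         counter_1 += 1
--     new_str = a[:most_inner_open_brac_index - len(brac_str)] + ls + a[first_closeing_brac_index + 1:]
--     return new_str
-- ===== SOURCE B (Python) =====
-- def is_alpha(a):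
--     if 'a' <= a <= 'z' or 'A' <= a <= 'Z':
--         return True
--     return False
--
-- def brac_uitwerken(a):
--     first_closeing_brac_index = a.find(")")
--     most_inner_open_brac_index = 0
--     counter = first_closeing_brac_index
--     while counter >= 0:
--         if a[counter] == "(":
--             most_inner_open_brac_index = counter
--             break
--         counter -= 1
--     binnenste_brac_part = a[most_inner_open_brac_index + 1:first_closeing_brac_index]
--     brac_str = a[a.rfind("(", 0, most_inner_open_brac_index) + 1:most_inner_open_brac_index]
--
--     # Segment view: every '#' ends one emitted piece; no char-by-char lookahead needed.
--     segs = binnenste_brac_part.split("#")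
--     pieces = []
--     word_part = ""
--     for j in range(len(segs) - 1):
--         seg = segs[j]
--         new_word = "".join(ch for ch in seg if is_alpha(ch))
--         hash_is_last = (j == len(segs) - 2 and segs[-1] == "")
--         next_is_plus = segs[j + 1][:1] == "+"
--         if seg and is_alpha(seg[-1]) and not hash_is_last and not next_is_plus:
--             word_part += seg[-1]
--         term = "#" if hash_is_last else "#+"
--         if word_part == new_word:
--             pieces.append(brac_str + new_word + term)
--         else:
--             pieces.append(brac_str + word_part + new_word + term)
--         if next_is_plus:
--             word_part = ""
--     ls = "".join(pieces)
--     return a[:most_inner_open_brac_index - len(brac_str)] + ls + a[first_closeing_brac_index + 1:]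
-- ===== Notes on version B (the rewrite author's own statement) =====
-- stated objective: faster
-- what changed: The bracket content is split once on the hash separator and one output piece is built per segment (new_word = the segment's alpha characters, word_part fed from the segment's last character, terminator decided by segment position, output assembled with a single join), replacing A's character-by-character scan with try/except two-character lookahead and repeated string concatenation.
import Mathlib
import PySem

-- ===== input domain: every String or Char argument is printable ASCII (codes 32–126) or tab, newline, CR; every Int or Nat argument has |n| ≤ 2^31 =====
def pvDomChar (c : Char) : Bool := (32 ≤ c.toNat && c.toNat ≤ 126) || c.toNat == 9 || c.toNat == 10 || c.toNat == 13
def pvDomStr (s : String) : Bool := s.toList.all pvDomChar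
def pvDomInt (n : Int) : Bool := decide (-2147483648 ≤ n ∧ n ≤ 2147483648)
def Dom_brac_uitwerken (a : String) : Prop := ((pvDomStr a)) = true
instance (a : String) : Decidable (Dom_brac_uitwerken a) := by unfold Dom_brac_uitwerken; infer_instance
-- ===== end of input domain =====

-- B rebuilds the expansion segment-by-segment from binnenste.split('#') instead of A's char-by-char scan
-- with two-character lookahead; objective: simpler decomposition, same result.

-- helper is_alpha, shared by both Python modules
def pvIsAlpha (c : Char) : Bool :=
  if ('a' ≤ c ∧ c ≤ 'z') ∨ ('A' ≤ c ∧ c ≤ 'Z') then true else false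

-- the backward `while counter >= 0` search for '(' (identical prefix code of A and B), as a Nat
-- recursion; counter ≤ a.find(')') < len a keeps a[counter] in range, so the Option read is exact.
def pvFindOpen (a : List Char) : Nat → Nat
  | 0 => 0        -- at counter 0 the loop result is 0 whether or not a[0] = '('
  | c + 1 => if a[c + 1]? = some '(' then c + 1 else pvFindOpen a c

-- ===== PORT A =====
-- A's word_part update at an alpha character: binnenste[counter_1+1] == '#' and binnenste[counter_1+2] != '+',
-- reading the first two elements of the remaining suffix (a missing element is Python's IndexError,
-- whose `except: pass` keeps word_part unchanged).
def pvWpLook (wp : List Char) (c : Char) (rest : List Char) : List Char :=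
  match rest with
  | d1 :: d2 :: _ => if d1 = '#' ∧ d2 ≠ '+' then wp ++ [c] else wp
  | _ => wp

-- A's word_part reset after a '#': binnenste[counter_1+1] == '+' (IndexError keeps word_part).
def pvWpReset (wp : List Char) (rest : List Char) : List Char :=
  match rest with
  | d :: _ => if d = '+' then ([] : List Char) else wp
  | [] => wp

-- A's `for counter_1 in range(len(binnenste))` loop, recursion on the suffix after the current
-- character; `counter_1 == len(binnenste) - 1` is `rest = []`; state (new_word, word_part, ls).
def pvALoop (brac : List Char) : List Char → List Char → List Char → List Char → List Char
  | [], _nw, _wp, ls => ls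
  | c :: rest, nw, wp, ls =>
    if pvIsAlpha c then
      pvALoop brac rest (nw ++ [c]) (pvWpLook wp c rest) ls
    else if c = '#' then
      let term := if rest = [] then ['#'] else ['#', '+']
      let piece := if wp = nw then brac ++ nw ++ term else brac ++ wp ++ nw ++ term
      pvALoop brac rest [] (pvWpReset wp rest) (ls ++ piece)
    else
      pvALoop brac rest nw wp ls

def brac_uitwerken (a : String) : String :=
  let al := a.toList
  let fc := PySem.Chars.find al [')']
  let mo : Nat := if fc < 0 then 0 else pvFindOpen al fc.toNat
  let binnenste := PySem.List.slice al (some ((mo : Int) + 1)) (some fc)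
  let brac := PySem.List.slice al (some (PySem.Chars.rfindFrom al ['('] 0 (some (mo : Int)) + 1)) (some (mo : Int))
  let ls := pvALoop brac binnenste [] [] []
  String.ofList (PySem.List.slice al none (some ((mo : Int) - brac.length)) ++ ls ++
    PySem.List.slice al (some (fc + 1)) none)

-- ===== PORT B =====
-- segs[j+1][:1] == "+"  (first character of a segment, False for the empty segment)
def pvHeadPlus : List Char → Bool
  | d :: _ => decide (d = '+')
  | [] => false

-- B's word_part update for one segment: seg and is_alpha(seg[-1]) and not hash_is_last and not next_is_plus
def pvWpSeg (wp s : List Char) (hashLast nextPlus : Bool) : List Char :=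
  match s.getLast? with
  | some c => if pvIsAlpha c ∧ hashLast = false ∧ nextPlus = false then wp ++ [c] else wp
  | none => wp

-- B's loop over segs = binnenste.split('#'): each iteration handles one '#' (segment j, with lookahead
-- only at segs[j+1]); the final segment (no '#' after it) emits nothing; state word_part.
def pvBLoop (brac : List Char) : List Char → List (List Char) → List Char
  | _wp, [] => []
  | _wp, [_] => []
  | wp, s :: r :: rest =>
    let nw := s.filter pvIsAlpha                          -- new_word = alpha chars of the segment
    let hashLast : Bool := decide (r = [] ∧ rest = [])    -- j == len(segs)-2 and segs[-1] == ""
    let nextPlus : Bool := pvHeadPlus r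
    let wp' := pvWpSeg wp s hashLast nextPlus
    let term := if hashLast then ['#'] else ['#', '+']
    let piece := if wp' = nw then brac ++ nw ++ term else brac ++ wp' ++ nw ++ term
    let wp'' := if nextPlus then ([] : List Char) else wp'
    piece ++ pvBLoop brac wp'' (r :: rest)

def brac_uitwerken_alt (a : String) : String :=
  let al := a.toList
  let fc := PySem.Chars.find al [')']
  let mo : Nat := if fc < 0 then 0 else pvFindOpen al fc.toNat
  let binnenste := PySem.List.slice al (some ((mo : Int) + 1)) (some fc)
  let brac := PySem.List.slice al (some (PySem.Chars.rfindFrom al ['('] 0 (some (mo : Int)) + 1)) (some (mo : Int))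
  let segs := binnenste.splitOn '#'                       -- binnenste.split('#')
  let ls := pvBLoop brac [] segs
  String.ofList (PySem.List.slice al none (some ((mo : Int) - brac.length)) ++ ls ++
    PySem.List.slice al (some (fc + 1)) none)

-- ===== PRECONDITION & SPEC =====
def Spec_brac_uitwerken (a : String) (out : String) : Prop := out = brac_uitwerken_alt a
instance (a : String) (out : String) : Decidable (Spec_brac_uitwerken a out) := by unfold Spec_brac_uitwerken; infer_instance

-- ===== CLAIM (what is proved, stated in full; the proofs are below) =====
def Claim_equal_brac_uitwerken : Prop := ∀ (a : String), Dom_brac_uitwerken a → Spec_brac_uitwerken a (brac_uitwerken a)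

-- ===== LEMMAS AND PROOFS =====

-- pvBLoop with the accumulated new_word of the partially consumed first segment prefixed (proof device:
-- the state of A's scan in the middle of a segment).
def pvG (brac nw wp : List Char) : List (List Char) → List Char
  | [] => []
  | [_] => []
  | s :: r :: rest =>
    let nw' := nw ++ s.filter pvIsAlpha
    let hashLast : Bool := decide (r = [] ∧ rest = [])
    let nextPlus : Bool := pvHeadPlus r
    let wp' := pvWpSeg wp s hashLast nextPlus
    let term := if hashLast then ['#'] else ['#', '+']
    let piece := if wp' = nw' then brac ++ nw' ++ term else brac ++ wp' ++ nw' ++ term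
    let wp'' := if nextPlus then ([] : List Char) else wp'
    piece ++ pvBLoop brac wp'' (r :: rest)

lemma pvG_nil_eq (brac wp : List Char) (segs : List (List Char)) :
    pvG brac [] wp segs = pvBLoop brac wp segs := by
  match segs with
  | [] => rfl
  | [_] => rfl
  | s :: r :: rest => simp [pvG, pvBLoop]

lemma pvWpSeg_nil (wp : List Char) (hl np : Bool) : pvWpSeg wp [] hl np = wp := rfl

lemma pvWpReset_eq (wp rest : List Char) :
    pvWpReset wp rest = if pvHeadPlus rest = true then [] else wp := by
  cases rest with
  | nil => simp [pvWpReset, pvHeadPlus]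
  | cons d t => by_cases hd : d = '+' <;> simp [pvWpReset, pvHeadPlus, hd]

lemma pvALoop_alpha (brac : List Char) (c : Char) (rest nw wp ls : List Char)
    (hal : pvIsAlpha c = true) :
    pvALoop brac (c :: rest) nw wp ls =
      pvALoop brac rest (nw ++ [c]) (pvWpLook wp c rest) ls := by
  simp [pvALoop, hal]

lemma pvALoop_hash (brac rest nw wp ls : List Char) :
    pvALoop brac ('#' :: rest) nw wp ls =
      pvALoop brac rest [] (pvWpReset wp rest)
        (ls ++ (if wp = nw then brac ++ nw ++ (if rest = [] then ['#'] else ['#', '+'])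
                else brac ++ wp ++ nw ++ (if rest = [] then ['#'] else ['#', '+']))) := rfl

lemma pvALoop_skip (brac : List Char) (c : Char) (rest nw wp ls : List Char)
    (hal : pvIsAlpha c = false) (hc : c ≠ '#') :
    pvALoop brac (c :: rest) nw wp ls = pvALoop brac rest nw wp ls := by
  simp [pvALoop, hal, hc]

lemma pvG_cons (brac nw wp s : List Char) (r : List Char) (rest : List (List Char)) :
    pvG brac nw wp (s :: r :: rest) =
      (if pvWpSeg wp s (decide (r = [] ∧ rest = [])) (pvHeadPlus r) = nw ++ s.filter pvIsAlpha then
          brac ++ (nw ++ s.filter pvIsAlpha) ++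
            (if (decide (r = [] ∧ rest = []) : Bool) = true then ['#'] else ['#', '+'])
        else
          brac ++ pvWpSeg wp s (decide (r = [] ∧ rest = [])) (pvHeadPlus r) ++
            (nw ++ s.filter pvIsAlpha) ++
            (if (decide (r = [] ∧ rest = []) : Bool) = true then ['#'] else ['#', '+'])) ++
      pvBLoop brac
        (if pvHeadPlus r = true then []
         else pvWpSeg wp s (decide (r = [] ∧ rest = [])) (pvHeadPlus r)) (r :: rest) := rfl

lemma split_ne_nil (t : List Char) : t.splitOn '#' ≠ [] := by
  simp only [List.splitOn]
  exact List.splitOnP_ne_nil _ t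

lemma split_cons_hash (t : List Char) : ('#' :: t).splitOn '#' = [] :: t.splitOn '#' := by
  simp [List.splitOn, List.splitOnP_cons]

lemma split_cons_ne (c : Char) (t : List Char) (hc : c ≠ '#') :
    (c :: t).splitOn '#' = (t.splitOn '#').modifyHead (c :: ·) := by
  simp [List.splitOn, List.splitOnP_cons, hc]

lemma split_eq_nilnil_iff (t : List Char) : t.splitOn '#' = [[]] ↔ t = [] := by
  constructor
  · intro h
    cases t with
    | nil => rfl
    | cons c t' =>
      exfalso
      by_cases hc : c = '#'
      · subst hc
        rw [split_cons_hash] at h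
        exact split_ne_nil t' (by injection h)
      · obtain ⟨s, r, hsr⟩ := List.exists_cons_of_ne_nil (split_ne_nil t')
        rw [split_cons_ne c t' hc, hsr] at h
        simp at h
  · rintro rfl
    exact List.splitOn_nil '#'

lemma split_head_plus (t s0 : List Char) (r : List (List Char)) (h : t.splitOn '#' = s0 :: r) :
    pvHeadPlus s0 = pvHeadPlus t := by
  cases t with
  | nil =>
    rw [List.splitOn_nil] at h
    injection h with h1 _
    subst h1
    rfl
  | cons c t' =>
    by_cases hc : c = '#'
    · subst hc
      rw [split_cons_hash] at h
      injection h with h1 _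
      subst h1
      simp [pvHeadPlus]
    · obtain ⟨s, rr, hsr⟩ := List.exists_cons_of_ne_nil (split_ne_nil t')
      rw [split_cons_ne c t' hc, hsr] at h
      simp only [List.modifyHead] at h
      injection h with h1 _
      subst h1
      rfl

lemma split_inv_nil (t : List Char) (r : List Char) (rs : List (List Char))
    (h : t.splitOn '#' = [] :: r :: rs) : ∃ u, t = '#' :: u ∧ u.splitOn '#' = r :: rs := by
  cases t with
  | nil =>
    rw [List.splitOn_nil] at h
    injection h with _ h2
    simp at h2
  | cons d u =>
    by_cases hd : d = '#'
    · subst hd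
      rw [split_cons_hash] at h
      exact ⟨u, rfl, by injection h⟩
    · exfalso
      obtain ⟨s, rr, hs⟩ := List.exists_cons_of_ne_nil (split_ne_nil u)
      rw [split_cons_ne d u hd, hs] at h
      simp at h

lemma split_inv_cons (t : List Char) (e : Char) (s0 : List Char) (rs : List (List Char))
    (h : t.splitOn '#' = (e :: s0) :: rs) : e ≠ '#' ∧ ∃ u, t = e :: u ∧ u.splitOn '#' = s0 :: rs := by
  cases t with
  | nil =>
    rw [List.splitOn_nil] at h
    injection h with h1 _
    simp at h1
  | cons d u =>
    by_cases hd : d = '#'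
    · subst hd
      rw [split_cons_hash] at h
      injection h with h1 _
      simp at h1
    · obtain ⟨s, rr, hs⟩ := List.exists_cons_of_ne_nil (split_ne_nil u)
      rw [split_cons_ne d u hd, hs] at h
      simp only [List.modifyHead, List.cons.injEq] at h
      obtain ⟨⟨rfl, rfl⟩, rfl⟩ := h
      exact ⟨hd, u, rfl, hs⟩

lemma pvALoop_eq (brac : List Char) :
    ∀ (l nw wp ls : List Char),
      pvALoop brac l nw wp ls = ls ++ pvG brac nw wp (l.splitOn '#') := by
  intro l
  induction l with
  | nil =>
    intro nw wp ls
    rw [List.splitOn_nil]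
    simp [pvALoop, pvG]
  | cons c rest ih =>
    intro nw wp ls
    obtain ⟨s0, rest', hsp⟩ := List.exists_cons_of_ne_nil (split_ne_nil rest)
    by_cases hc : c = '#'
    · -- the '#' step: one piece is emitted; it matches B's piece for the segment just ended
      subst hc
      have h1 : (decide (s0 = [] ∧ rest' = []) : Bool) = decide (rest = []) := by
        apply decide_eq_decide.mpr
        constructor
        · rintro ⟨rfl, rfl⟩; exact (split_eq_nilnil_iff rest).mp hsp
        · rintro rfl
          rw [List.splitOn_nil] at hsp
          injection hsp with e1 e2
          exact ⟨e1.symm, e2.symm⟩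
      have h2 : pvHeadPlus s0 = pvHeadPlus rest := split_head_plus rest s0 rest' hsp
      rw [pvALoop_hash, ih, pvG_nil_eq, hsp, split_cons_hash, hsp, pvG_cons]
      simp [pvWpSeg_nil, pvWpReset_eq, h1, h2, List.append_assoc]
    · -- c ≠ '#': the split of c :: rest prepends c to the first segment
      rw [split_cons_ne c rest hc, hsp]
      simp only [List.modifyHead]
      by_cases hal : pvIsAlpha c = true
      · -- alpha step
        rw [pvALoop_alpha brac c rest nw wp ls hal, ih, hsp]
        cases rest' with
        | nil => rfl
        | cons r rest2 =>
          have hnw : (nw ++ [c]) ++ s0.filter pvIsAlpha = nw ++ (c :: s0).filter pvIsAlpha := by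
            simp [hal]
          have hwp : pvWpSeg (pvWpLook wp c rest) s0 (decide (r = [] ∧ rest2 = [])) (pvHeadPlus r) =
              pvWpSeg wp (c :: s0) (decide (r = [] ∧ rest2 = [])) (pvHeadPlus r) := by
            cases s0 with
            | nil =>
              obtain ⟨u, rfl, hu⟩ := split_inv_nil rest r rest2 hsp
              cases u with
              | nil =>
                rw [List.splitOn_nil] at hu
                injection hu with e1 e2
                subst e1
                subst e2
                simp [pvWpSeg, pvWpLook]
              | cons d2 u2 =>
                have hnl : (decide (r = [] ∧ rest2 = []) : Bool) = false := by
                  simp only [decide_eq_false_iff_not]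
                  rintro ⟨rfl, rfl⟩
                  have := (split_eq_nilnil_iff (d2 :: u2)).mp hu
                  simp at this
                have hp : pvHeadPlus r = decide (d2 = '+') :=
                  split_head_plus (d2 :: u2) r rest2 hu
                by_cases hd2 : d2 = '+'
                · subst hd2
                  simp [pvWpSeg, pvWpLook, hnl, hp]
                · simp [pvWpSeg, pvWpLook, hal, hnl, hp, hd2]
            | cons e s0' =>
              obtain ⟨he, u, rfl, hu⟩ := split_inv_cons rest e s0' (r :: rest2) hsp
              have hlook : pvWpLook wp c (e :: u) = wp := by
                cases u with
                | nil => rfl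
                | cons d2 u2 => simp [pvWpLook, he]
              rw [hlook]
              simp [pvWpSeg, List.getLast?_cons_cons]
          rw [pvG_cons, pvG_cons, hwp, hnw]
      · -- neither alpha nor '#': the character is skipped on both sides
        have hal' : pvIsAlpha c = false := by
          cases hb : pvIsAlpha c
          · rfl
          · exact absurd hb hal
        rw [pvALoop_skip brac c rest nw wp ls hal' hc, ih, hsp]
        cases rest' with
        | nil => rfl
        | cons r rest2 =>
          have hnw : nw ++ s0.filter pvIsAlpha = nw ++ (c :: s0).filter pvIsAlpha := by
            simp [hal']
          have hwp : pvWpSeg wp s0 (decide (r = [] ∧ rest2 = [])) (pvHeadPlus r) =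
              pvWpSeg wp (c :: s0) (decide (r = [] ∧ rest2 = [])) (pvHeadPlus r) := by
            cases s0 with
            | nil => simp [pvWpSeg, hal']
            | cons e s0' => simp [pvWpSeg, List.getLast?_cons_cons]
          rw [pvG_cons, pvG_cons, hwp, hnw]

theorem pvLoop_main (brac bin : List Char) :
    pvALoop brac bin [] [] [] = pvBLoop brac [] (bin.splitOn '#') := by
  rw [pvALoop_eq, pvG_nil_eq]
  rfl

-- ===== VERDICT (by name: the statement is the Claim_ definition above) =====
theorem brac_uitwerken_spec : Claim_equal_brac_uitwerken := by
  intro a _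
  unfold Spec_brac_uitwerken
  simp only [brac_uitwerken, brac_uitwerken_alt]
  rw [pvLoop_main]
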